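-- pv_equiv track=rewrite | github.com/meierjl/truQuant | version 2/truQuant.py | combine_indv_gene_counts_dict
-- ===== SOURCE A (Python) =====
-- def combine_indv_gene_counts_dict(count_information_list, sequencing_files):
--     # Need to combine the dictionaries to fit the gene_counts dict format
--     ret_region_data_dict = {}
--     gene_counts_dict = {}
--
--     for i, tup in enumerate(count_information_list):
--         # Tup has the sequencing_file, indv_gene_counts_dict, and region_data_dict
--         sequencing_file, indv_gene_counts_dict, region_data_dict = tup
--
--         for gene_name in indv_gene_counts_dict:
--             if gene_name not in gene_counts_dict:
--                 gene_counts_dict[gene_name] = {"Pause": [-1] * len(sequencing_files),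
--                                                "Body": [-1] * len(sequencing_files)}
--
--             gene_counts_dict[gene_name]["Pause"][i] = indv_gene_counts_dict[gene_name]["Pause"]
--             gene_counts_dict[gene_name]["Body"][i] = indv_gene_counts_dict[gene_name]["Body"]
--
--         if region_data_dict != {}:
--             ret_region_data_dict = region_data_dict
--
--     return ret_region_data_dict, gene_counts_dict
-- ===== SOURCE B (Python) =====
-- def combine_indv_gene_counts_dict(count_information_list, sequencing_files):
--     # Gene-major rebuild: discover the gene order once, then build each gene's
--     # Pause/Body columns directly; the last non-empty region dict is found by
--     # scanning the tuples back-to-front.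
--     m = len(sequencing_files)
--
--     order = []
--     seen = set()
--     for _, indv_gene_counts_dict, _ in count_information_list:
--         for gene in indv_gene_counts_dict:
--             if gene not in seen:
--                 seen.add(gene)
--                 order.append(gene)
--
--     def column(gene, key):
--         vals = {i: indv[gene][key]
--                 for i, (_, indv, _) in enumerate(count_information_list)
--                 if gene in indv}
--         return [vals.get(i, -1) for i in range(m)]
--
--     gene_counts_dict = {gene: {"Pause": column(gene, "Pause"),
--                                "Body": column(gene, "Body")}
--                         for gene in order}
--
--     region_data_dict = next((r for _, _, r in reversed(count_information_list) if r), {})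
--     return region_data_dict, gene_counts_dict
-- ===== Notes on version B (the rewrite author's own statement) =====
-- stated objective: alternative
-- what changed: Replaces A's single pass that lazily initializes and mutates per-gene Pause/Body arrays in place with a gene-major rebuild: one pass collects the gene order, each gene's columns are then constructed directly from an index->value map, and the region dict is found by a back-to-front scan for the first non-empty one.
import Mathlib
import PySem

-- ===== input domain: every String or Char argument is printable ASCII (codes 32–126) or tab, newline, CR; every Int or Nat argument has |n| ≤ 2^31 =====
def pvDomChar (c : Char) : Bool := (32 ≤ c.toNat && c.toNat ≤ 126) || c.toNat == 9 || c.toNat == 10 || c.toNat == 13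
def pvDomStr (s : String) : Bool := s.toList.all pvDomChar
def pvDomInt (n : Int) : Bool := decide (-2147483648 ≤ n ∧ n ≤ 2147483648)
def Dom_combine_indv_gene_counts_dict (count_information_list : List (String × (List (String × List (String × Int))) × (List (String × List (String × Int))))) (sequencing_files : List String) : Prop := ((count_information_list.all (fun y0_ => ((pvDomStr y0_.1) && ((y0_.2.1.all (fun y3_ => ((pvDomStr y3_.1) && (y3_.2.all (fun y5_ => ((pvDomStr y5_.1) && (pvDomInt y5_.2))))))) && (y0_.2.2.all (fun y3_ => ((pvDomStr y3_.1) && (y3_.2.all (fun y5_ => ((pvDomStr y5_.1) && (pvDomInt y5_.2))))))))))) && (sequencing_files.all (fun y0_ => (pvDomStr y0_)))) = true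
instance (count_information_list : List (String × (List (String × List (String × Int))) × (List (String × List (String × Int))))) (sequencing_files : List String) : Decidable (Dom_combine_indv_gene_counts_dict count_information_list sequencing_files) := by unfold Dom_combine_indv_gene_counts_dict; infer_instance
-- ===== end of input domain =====

-- B replaces A's single pass with lazily-initialized, in-place-mutated per-gene arrays by a
-- gene-major rebuild (gene order first, then each column built directly; region dict found by a
-- back-to-front scan); objective: alternative structure, same exact results.

-- The Lean type of a tuple (sequencing_file, indv_gene_counts_dict, region_data_dict)
abbrev PvTup : Type := String × (List (String × List (String × Int))) × (List (String × List (String × Int)))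

-- Python dict-of-dicts boundary: the association lists stand for dicts (built as Python builds
-- them: later duplicate keys overwrite in place); both ports read their dict arguments through this.
def pvNormDD (l : List (String × List (String × Int))) : PySem.Dict String (PySem.Dict String Int) :=
  PySem.Dict.ofList (l.map (fun p => (p.1, PySem.Dict.ofList p.2)))

def pvItemsDD (d : PySem.Dict String (PySem.Dict String Int)) : List (String × List (String × Int)) :=
  d.items.map (fun p => (p.1, p.2.items))

-- ===== PORT A =====
-- one iteration of A's inner `for gene_name in indv_gene_counts_dict` body
def pvStepGene (m : Nat) (i : Int) (indv : PySem.Dict String (PySem.Dict String Int))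
    (gcd : PySem.Dict String (List Int × List Int)) (gene : String) :
    PySem.Dict String (List Int × List Int) :=
  let gcd := if gcd.contains gene then gcd
             else gcd.insert gene (List.replicate m (-1), List.replicate m (-1))
  let inner := indv.getD gene PySem.Dict.empty
  gcd.modify gene ([], []) (fun pb =>
    (PySem.List.pySetD pb.1 i (inner.getD "Pause" 0),
     PySem.List.pySetD pb.2 i (inner.getD "Body" 0)))

-- `if region_data_dict != {}: ret_region_data_dict = region_data_dict`
def pvRegStep (reg : List (String × List (String × Int))) (t : PvTup) :
    List (String × List (String × Int)) :=
  if (pvNormDD t.2.2).size != 0 then pvItemsDD (pvNormDD t.2.2) else reg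

-- the whole body of A's `for i, tup in enumerate(...)` acting on gene_counts_dict
def pvGcdStep (m : Nat) (gcd : PySem.Dict String (List Int × List Int)) (it : Int × PvTup) :
    PySem.Dict String (List Int × List Int) :=
  let indv := pvNormDD it.2.2.1
  indv.keys.foldl (pvStepGene m it.1 indv) gcd

def combine_indv_gene_counts_dict (count_information_list : List (String × (List (String × List (String × Int))) × (List (String × List (String × Int))))) (sequencing_files : List String) : (List (String × List (String × Int))) × (List (String × List (String × List Int))) :=
  let m := sequencing_files.length
  let res := (PySem.List.enumerate count_information_list 0).foldl
    (fun st it => (pvRegStep st.1 it.2, pvGcdStep m st.2 it))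
    ([], PySem.Dict.empty)
  (res.1, res.2.items.map (fun p => (p.1, [("Pause", p.2.1), ("Body", p.2.2)])))

-- ===== PORT B =====
-- B's `column(gene, key)`: index->value map, then one read per slot
def pvColumn (count_information_list : List PvTup) (m : Nat) (gene key : String) : List Int :=
  let vals : PySem.Dict Int Int := (PySem.List.enumerate count_information_list 0).foldl
    (fun d it =>
      let indv := pvNormDD it.2.2.1
      if indv.contains gene then
        d.insert it.1 ((indv.getD gene PySem.Dict.empty).getD key 0)
      else d)
    PySem.Dict.empty
  (PySem.List.pyRange 0 (m : Int) 1).map (fun i => vals.getD i (-1))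

def combine_indv_gene_counts_dict_alt (count_information_list : List (String × (List (String × List (String × Int))) × (List (String × List (String × Int))))) (sequencing_files : List String) : (List (String × List (String × Int))) × (List (String × List (String × List Int))) :=
  let m := sequencing_files.length
  let order : PySem.Set String :=
    PySem.Set.ofList (count_information_list.flatMap (fun t => (pvNormDD t.2.1).keys))
  let gene_counts := order.map (fun g =>
    (g, [("Pause", pvColumn count_information_list m g "Pause"),
         ("Body", pvColumn count_information_list m g "Body")]))
  let region := match count_information_list.reverse.find? (fun t => (pvNormDD t.2.2).size != 0) with
    | some t => pvItemsDD (pvNormDD t.2.2)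
    | none => []
  (region, gene_counts)

-- ===== PRECONDITION & SPEC =====
-- Pre_ excludes exactly the inputs where Python A raises: an IndexError when a tuple at index
-- i ≥ len(sequencing_files) carries a non-empty gene dict, and a KeyError when some gene's inner
-- dict lacks a "Pause" or "Body" key.
def Pre_combine_indv_gene_counts_dict (count_information_list : List (String × (List (String × List (String × Int))) × (List (String × List (String × Int))))) (sequencing_files : List String) : Prop :=
  ∀ it ∈ PySem.List.enumerate count_information_list 0,
    (it.2.2.1 ≠ [] → it.1 < (sequencing_files.length : Int)) ∧
    ∀ p ∈ (pvNormDD it.2.2.1).items, p.2.contains "Pause" = true ∧ p.2.contains "Body" = true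
instance (count_information_list : List (String × (List (String × List (String × Int))) × (List (String × List (String × Int))))) (sequencing_files : List String) : Decidable (Pre_combine_indv_gene_counts_dict count_information_list sequencing_files) := by unfold Pre_combine_indv_gene_counts_dict; infer_instance

def pvWitness_combine_indv_gene_counts_dict : (List (String × (List (String × List (String × Int))) × (List (String × List (String × Int))))) × List String :=
  ([("f1", [("g1", [("Pause", 1), ("Body", 2)])], [("g1", [("x", 3)])]),
    ("f2", [("g2", [("Pause", 4), ("Body", 5)])], [])],
   ["f1", "f2"])

def Spec_combine_indv_gene_counts_dict (count_information_list : List (String × (List (String × List (String × Int))) × (List (String × List (String × Int))))) (sequencing_files : List String) (out : (List (String × List (String × Int))) × (List (String × List (String × List Int)))) : Prop := out = combine_indv_gene_counts_dict_alt count_information_list sequencing_files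
instance (count_information_list : List (String × (List (String × List (String × Int))) × (List (String × List (String × Int))))) (sequencing_files : List String) (out : (List (String × List (String × Int))) × (List (String × List (String × List Int)))) : Decidable (Spec_combine_indv_gene_counts_dict count_information_list sequencing_files out) := by unfold Spec_combine_indv_gene_counts_dict; infer_instance

-- ===== CLAIM (what is proved, stated in full; the proofs are below) =====
def Claim_equal_combine_indv_gene_counts_dict : Prop := ∀ (count_information_list : List (String × (List (String × List (String × Int))) × (List (String × List (String × Int))))) (sequencing_files : List String), Dom_combine_indv_gene_counts_dict count_information_list sequencing_files → Pre_combine_indv_gene_counts_dict count_information_list sequencing_files → Spec_combine_indv_gene_counts_dict count_information_list sequencing_files (combine_indv_gene_counts_dict count_information_list sequencing_files)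

-- ===== LEMMAS AND PROOFS =====

-- proof-side shorthand: the joint write A performs for one gene at slot i
def pvWrite (i : Int) (inner : PySem.Dict String Int) (pb : List Int × List Int) :
    List Int × List Int :=
  (PySem.List.pySetD pb.1 i (inner.getD "Pause" 0),
   PySem.List.pySetD pb.2 i (inner.getD "Body" 0))

-- per-gene trace of A's writes along the enumerated list
def pvColFold (g : String) (e : List (Int × PvTup)) (pb : List Int × List Int) :
    List Int × List Int :=
  e.foldl (fun pb it =>
    if (pvNormDD it.2.2.1).contains g then
      pvWrite it.1 ((pvNormDD it.2.2.1).getD g PySem.Dict.empty) pb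
    else pb) pb

-- the gene names of the enumerated list, concatenated
def pvKs (e : List (Int × PvTup)) : List String :=
  e.flatMap (fun it => (pvNormDD it.2.2.1).keys)

-- B's index->value map along an arbitrary enumerated list
def pvValsFold (g key : String) (e : List (Int × PvTup)) (d : PySem.Dict Int Int) :
    PySem.Dict Int Int :=
  e.foldl (fun d it =>
    if (pvNormDD it.2.2.1).contains g then
      d.insert it.1 (((pvNormDD it.2.2.1).getD g PySem.Dict.empty).getD key 0)
    else d) d

-- ---- inner loop (one tuple, fold over its gene keys) ----

theorem pv_inner_get?_not_mem (m : Nat) (i : Int) (indv : PySem.Dict String (PySem.Dict String Int))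
    (ks : List String) (gcd : PySem.Dict String (List Int × List Int)) (g : String)
    (hg : g ∉ ks) :
    (ks.foldl (pvStepGene m i indv) gcd).get? g = gcd.get? g := by
  induction ks generalizing gcd with
  | nil => rfl
  | cons k ks ih =>
    have hne : g ≠ k := fun h => hg (h ▸ List.mem_cons_self)
    rw [List.foldl_cons, ih _ (fun h => hg (List.mem_cons_of_mem _ h))]
    simp only [pvStepGene, PySem.Dict.modify]
    rw [PySem.Dict.get?_insert_of_ne _ _ hne]
    split
    · rfl
    · rw [PySem.Dict.get?_insert_of_ne _ _ hne]

theorem pv_inner_get?_mem (m : Nat) (i : Int) (indv : PySem.Dict String (PySem.Dict String Int))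
    (ks : List String) (gcd : PySem.Dict String (List Int × List Int)) (g : String)
    (hnd : ks.Nodup) (hg : g ∈ ks) :
    (ks.foldl (pvStepGene m i indv) gcd).get? g =
      some (pvWrite i (indv.getD g PySem.Dict.empty)
        ((gcd.get? g).getD (List.replicate m (-1), List.replicate m (-1)))) := by
  induction ks generalizing gcd with
  | nil => exact absurd hg (List.not_mem_nil)
  | cons k ks ih =>
    rw [List.foldl_cons]
    by_cases hgk : g = k
    · subst hgk
      have hrest : g ∉ ks := (List.nodup_cons.1 hnd).1
      rw [pv_inner_get?_not_mem _ _ _ _ _ _ hrest]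
      simp only [pvStepGene, PySem.Dict.modify]
      by_cases hc : gcd.contains g = true
      · rcases Option.isSome_iff_exists.1 ((PySem.Dict.contains_eq_isSome_get? gcd g) ▸ hc)
          with ⟨pb, hpb⟩
        simp only [hc, if_true, PySem.Dict.get?_insert_self, hpb, Option.getD_some]
        rw [PySem.Dict.getD_eq_get?_getD, hpb]
        simp [pvWrite]
      · have hc' : gcd.contains g = false := by simpa using hc
        have hnone : gcd.get? g = none := (PySem.Dict.get?_eq_none_iff_contains gcd g).2 hc'
        simp only [hc', Bool.false_eq_true, if_false, PySem.Dict.get?_insert_self, hnone,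
          Option.getD_none]
        rw [PySem.Dict.getD_insert_self]
        simp [pvWrite]
    · have hg' : g ∈ ks := (List.mem_cons.1 hg).resolve_left hgk
      rw [ih _ (List.nodup_cons.1 hnd).2 hg']
      have hpres : (pvStepGene m i indv gcd k).get? g = gcd.get? g := by
        simp only [pvStepGene, PySem.Dict.modify]
        rw [PySem.Dict.get?_insert_of_ne _ _ hgk]
        split
        · rfl
        · rw [PySem.Dict.get?_insert_of_ne _ _ hgk]
      rw [hpres]

theorem pv_inner_keys (m : Nat) (i : Int) (indv : PySem.Dict String (PySem.Dict String Int))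
    (ks : List String) (gcd : PySem.Dict String (List Int × List Int)) :
    (ks.foldl (pvStepGene m i indv) gcd).keys = PySem.Set.update gcd.keys ks := by
  induction ks generalizing gcd with
  | nil => rw [List.foldl_nil, PySem.Set.update_nil]
  | cons k ks ih =>
    rw [List.foldl_cons, ih, PySem.Set.update_cons]
    congr 1
    simp only [pvStepGene, PySem.Dict.modify]
    by_cases hc : gcd.contains k = true
    · have hk : k ∈ gcd.keys := (PySem.Dict.contains_iff_mem_keys gcd k).1 hc
      simp only [hc, PySem.Dict.keys_insert_of_contains _ _ hc,
        PySem.Set.add_eq_ite, hk, if_pos]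
    · have hc' : gcd.contains k = false := by simpa using hc
      have hk : k ∉ gcd.keys := fun h => by
        simp [(PySem.Dict.contains_iff_mem_keys gcd k).2 h] at hc'
      have h1 : (gcd.insert k (List.replicate m (-1), List.replicate m (-1))).keys
          = gcd.keys ++ [k] := PySem.Dict.keys_insert_of_not_contains _ _ hc'
      have hc2 : (gcd.insert k (List.replicate m (-1), List.replicate m (-1))).contains k
          = true := PySem.Dict.contains_insert_self _ _ _
      simp only [hc', Bool.false_eq_true, if_false,
        PySem.Dict.keys_insert_of_contains _ _ hc2, h1, PySem.Set.add_eq_ite, hk]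

-- ---- outer loop over the enumerated tuples ----

theorem pv_outer_get? (m : Nat) (g : String) (e : List (Int × PvTup))
    (gcd : PySem.Dict String (List Int × List Int)) :
    (e.foldl (pvGcdStep m) gcd).get? g =
      match gcd.get? g with
      | some pb => some (pvColFold g e pb)
      | none => if g ∈ pvKs e then
          some (pvColFold g e (List.replicate m (-1), List.replicate m (-1))) else none := by
  induction e generalizing gcd with
  | nil => cases h : gcd.get? g <;> simp [h, pvKs, pvColFold]
  | cons it e ih =>
    rw [List.foldl_cons, ih]
    have hnd : (pvNormDD it.2.2.1).keys.Nodup := PySem.Dict.nodup_keys_ofList _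
    by_cases hmem : g ∈ (pvNormDD it.2.2.1).keys
    · have hc : (pvNormDD it.2.2.1).contains g = true :=
        (PySem.Dict.contains_iff_mem_keys _ _).2 hmem
      have hstep : (pvGcdStep m gcd it).get? g =
          some (pvWrite it.1 ((pvNormDD it.2.2.1).getD g PySem.Dict.empty)
            ((gcd.get? g).getD (List.replicate m (-1), List.replicate m (-1)))) := by
        simp only [pvGcdStep]
        exact pv_inner_get?_mem _ _ _ _ _ _ hnd hmem
      rw [hstep]
      cases h : gcd.get? g with
      | some pb => simp [pvColFold, hc]
      | none =>
        have hm2 : g ∈ pvKs (it :: e) := by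
          unfold pvKs
          rw [List.flatMap_cons]
          exact List.mem_append_left _ hmem
        simp [hm2, pvColFold, hc]
    · have hc : (pvNormDD it.2.2.1).contains g = false := by
        rcases Bool.eq_false_or_eq_true ((pvNormDD it.2.2.1).contains g) with h | h
        · exact absurd ((PySem.Dict.contains_iff_mem_keys _ _).1 h) hmem
        · exact h
      have hstep : (pvGcdStep m gcd it).get? g = gcd.get? g := by
        simp only [pvGcdStep]
        exact pv_inner_get?_not_mem _ _ _ _ _ _ hmem
      rw [hstep]
      have hks : (g ∈ pvKs (it :: e)) = (g ∈ pvKs e) := by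
        simp [pvKs, hmem]
      cases h : gcd.get? g with
      | some pb => simp [pvColFold, hc]
      | none =>
        by_cases hm : g ∈ pvKs e
        · have hm2 : g ∈ pvKs (it :: e) := by
            unfold pvKs at hm ⊢
            rw [List.flatMap_cons]
            exact List.mem_append_right _ hm
          simp [hm, hm2, pvColFold, hc]
        · have hm2 : g ∉ pvKs (it :: e) := by
            unfold pvKs at hm ⊢
            rw [List.flatMap_cons]
            intro hx
            rcases List.mem_append.1 hx with hx | hx
            · exact hmem hx
            · exact hm hx
          simp [hm, hm2]

theorem pv_outer_keys (m : Nat) (e : List (Int × PvTup))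
    (gcd : PySem.Dict String (List Int × List Int)) :
    (e.foldl (pvGcdStep m) gcd).keys = PySem.Set.update gcd.keys (pvKs e) := by
  induction e generalizing gcd with
  | nil => rw [List.foldl_nil, pvKs, List.flatMap_nil, PySem.Set.update_nil]
  | cons it e ih =>
    rw [List.foldl_cons, ih]
    have h1 : (pvGcdStep m gcd it).keys =
        PySem.Set.update gcd.keys (pvNormDD it.2.2.1).keys := by
      simp only [pvGcdStep]
      exact pv_inner_keys _ _ _ _ _
    rw [h1]
    conv_rhs => rw [pvKs, List.flatMap_cons, PySem.Set.update_append]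
    rfl

-- ---- A's column trace equals B's map read back over range m ----

theorem pv_col_rel (m : Nat) (g : String) (e : List (Int × PvTup))
    (he : ∀ it ∈ e, 0 ≤ it.1)
    (pb : List Int × List Int) (dP dB : PySem.Dict Int Int)
    (h1l : pb.1.length = m) (h2l : pb.2.length = m)
    (h1 : ∀ j : Nat, j < m → pb.1[j]? = some (dP.getD (j : Int) (-1)))
    (h2 : ∀ j : Nat, j < m → pb.2[j]? = some (dB.getD (j : Int) (-1))) :
    (pvColFold g e pb).1.length = m ∧ (pvColFold g e pb).2.length = m ∧
    (∀ j : Nat, j < m → (pvColFold g e pb).1[j]? =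
        some ((pvValsFold g "Pause" e dP).getD (j : Int) (-1))) ∧
    (∀ j : Nat, j < m → (pvColFold g e pb).2[j]? =
        some ((pvValsFold g "Body" e dB).getD (j : Int) (-1))) := by
  induction e generalizing pb dP dB with
  | nil => exact ⟨h1l, h2l, h1, h2⟩
  | cons it e ih =>
    have he' : ∀ it' ∈ e, 0 ≤ it'.1 := fun it' h => he it' (List.mem_cons_of_mem _ h)
    have hi : (0 : Int) ≤ it.1 := he it List.mem_cons_self
    by_cases hc : (pvNormDD it.2.2.1).contains g = true
    · simp only [pvColFold, pvValsFold, List.foldl_cons, hc, if_true] at *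
      set inner := (pvNormDD it.2.2.1).getD g PySem.Dict.empty with hinner
      refine ih he' (pvWrite it.1 inner pb) (dP.insert it.1 (inner.getD "Pause" 0))
        (dB.insert it.1 (inner.getD "Body" 0)) ?_ ?_ ?_ ?_
      · simp [pvWrite, PySem.List.length_pySetD, h1l]
      · simp [pvWrite, PySem.List.length_pySetD, h2l]
      · intro j hj
        simp only [pvWrite]
        rw [PySem.List.pySetD_of_nonneg _ _ hi, List.getElem?_set, PySem.Dict.getD_insert]
        by_cases hij : (j : Int) = it.1
        · have h1' : it.1.toNat = j := by omega
          have h2' : j < pb.1.length := by omega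
          simp [h1', h2', hij]
        · have h1' : ¬ it.1.toNat = j := by omega
          simp [h1', hij, h1 j hj]
      · intro j hj
        simp only [pvWrite]
        rw [PySem.List.pySetD_of_nonneg _ _ hi, List.getElem?_set, PySem.Dict.getD_insert]
        by_cases hij : (j : Int) = it.1
        · have h1' : it.1.toNat = j := by omega
          have h2' : j < pb.2.length := by omega
          simp [h1', h2', hij]
        · have h1' : ¬ it.1.toNat = j := by omega
          simp [h1', hij, h2 j hj]
    · have hc' : (pvNormDD it.2.2.1).contains g = false := by simpa using hc
      simp only [pvColFold, pvValsFold, List.foldl_cons, hc', Bool.false_eq_true, if_false]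
      exact ih he' pb dP dB h1l h2l h1 h2

theorem pv_col_eq (cil : List PvTup) (m : Nat) (g : String) :
    (pvColFold g (PySem.List.enumerate cil 0)
        (List.replicate m (-1), List.replicate m (-1))).1 = pvColumn cil m g "Pause" ∧
    (pvColFold g (PySem.List.enumerate cil 0)
        (List.replicate m (-1), List.replicate m (-1))).2 = pvColumn cil m g "Body" := by
  have he : ∀ it ∈ PySem.List.enumerate cil 0, (0 : Int) ≤ it.1 := by
    intro it h
    rcases (PySem.List.mem_enumerate_iff _ _ _).1 h with ⟨k, hk, rfl⟩
    simp
  obtain ⟨l1, l2, r1, r2⟩ := pv_col_rel m g _ he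
    (List.replicate m (-1), List.replicate m (-1)) PySem.Dict.empty PySem.Dict.empty
    (by simp) (by simp)
    (by intro j hj; simp [hj, PySem.Dict.getD_empty])
    (by intro j hj; simp [hj, PySem.Dict.getD_empty])
  have hcol : ∀ key, pvColumn cil m g key =
      (PySem.List.pyRange 0 (m : Int) 1).map
        (fun i => (pvValsFold g key (PySem.List.enumerate cil 0) PySem.Dict.empty).getD i (-1)) :=
    fun key => rfl
  constructor
  · rw [hcol]
    apply List.ext_getElem?
    intro j
    rw [PySem.List.pyRange_zero_natCast, List.map_map]
    by_cases hj : j < m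
    · rw [r1 j hj]
      simp [hj]
    · rw [List.getElem?_eq_none (by omega : (pvColFold g (PySem.List.enumerate cil 0)
        (List.replicate m (-1), List.replicate m (-1))).1.length ≤ j)]
      rw [List.getElem?_eq_none (by simp; omega)]
  · rw [hcol]
    apply List.ext_getElem?
    intro j
    rw [PySem.List.pyRange_zero_natCast, List.map_map]
    by_cases hj : j < m
    · rw [r2 j hj]
      simp [hj]
    · rw [List.getElem?_eq_none (by omega : (pvColFold g (PySem.List.enumerate cil 0)
        (List.replicate m (-1), List.replicate m (-1))).2.length ≤ j)]
      rw [List.getElem?_eq_none (by simp; omega)]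

-- ---- region: A's keep-last fold equals B's reversed first-match scan ----

theorem pv_region_eq (l : List PvTup) (r0 : List (String × List (String × Int))) :
    l.foldl pvRegStep r0 =
      match l.reverse.find? (fun t => (pvNormDD t.2.2).size != 0) with
      | some t => pvItemsDD (pvNormDD t.2.2)
      | none => r0 := by
  induction l generalizing r0 with
  | nil => rfl
  | cons x l ih =>
    rw [List.foldl_cons, ih, List.reverse_cons, List.find?_append]
    cases hf : l.reverse.find? (fun t => (pvNormDD t.2.2).size != 0) with
    | some t => rfl
    | none =>
      simp only [Option.none_or, List.find?_singleton]
      by_cases hp : ((pvNormDD x.2.2).size != 0) = true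
      · simp [hp, pvRegStep]
      · simp only [Bool.not_eq_true] at hp
        simp [hp, pvRegStep]

theorem pv_ks_enumerate (cil : List PvTup) :
    pvKs (PySem.List.enumerate cil 0) = cil.flatMap (fun t => (pvNormDD t.2.1).keys) := by
  conv_rhs => rw [← PySem.List.map_snd_enumerate cil 0]
  rw [pvKs, List.flatMap_map]

-- ===== VERDICT (by name: the statement is the Claim_ definition above) =====
theorem combine_indv_gene_counts_dict_spec : Claim_equal_combine_indv_gene_counts_dict := by
  intro cil sfs _ _
  unfold Spec_combine_indv_gene_counts_dict
  unfold combine_indv_gene_counts_dict combine_indv_gene_counts_dict_alt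
  simp only [PySem.List.foldl_prod_mk (fun reg (it : Int × PvTup) => pvRegStep reg it.2)
    (pvGcdStep sfs.length)]
  refine Prod.ext ?_ ?_
  · -- region component
    have hreg : (PySem.List.enumerate cil 0).foldl
        (fun r (it : Int × PvTup) => pvRegStep r it.2) [] = cil.foldl pvRegStep [] := by
      conv_rhs => rw [← PySem.List.map_snd_enumerate cil 0]
      rw [List.foldl_map]
    rw [hreg, pv_region_eq]
    rfl
  · -- gene_counts component
    have hkeys : ((PySem.List.enumerate cil 0).foldl (pvGcdStep sfs.length)
        PySem.Dict.empty).keys = PySem.Set.ofList (pvKs (PySem.List.enumerate cil 0)) := by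
      rw [pv_outer_keys]
      simp [PySem.Dict.keys_empty, PySem.Set.update_nil_left]
    have hnd : ((PySem.List.enumerate cil 0).foldl (pvGcdStep sfs.length)
        PySem.Dict.empty).keys.Nodup := by
      rw [hkeys]; exact PySem.Set.nodup_ofList _
    rw [PySem.Dict.items_eq_map_keys _ hnd ([], [])]
    rw [List.map_map, hkeys, ← pv_ks_enumerate]
    apply List.map_congr_left
    intro g hg
    have hmem : g ∈ pvKs (PySem.List.enumerate cil 0) := (PySem.Set.mem_ofList _ _).1 hg
    have hget : ((PySem.List.enumerate cil 0).foldl (pvGcdStep sfs.length)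
        PySem.Dict.empty).getD g ([], []) =
        pvColFold g (PySem.List.enumerate cil 0)
          (List.replicate sfs.length (-1), List.replicate sfs.length (-1)) := by
      rw [PySem.Dict.getD_eq_get?_getD, pv_outer_get?]
      simp [PySem.Dict.get?_empty, hmem]
    simp only [Function.comp]
    rw [hget]
    rcases pv_col_eq cil sfs.length g with ⟨h1, h2⟩
    simp [h1, h2]
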